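-- pv_equiv track=rewrite | github.com/Djruizz/algorithm-design | CiclosAnidadosYFunciones_26-sep/Ejercicio2.py | hide_pass
-- ===== SOURCE A (Python) =====
-- def hide_pass(password):
--     hidden = ""
--     index = 0
--     for i in password:
--         if index == 1 or index == 2:
--             hidden += "*"
--         else:
--             hidden += i
--         index += 1
--     return hidden
-- ===== SOURCE B (Python) =====
-- def hide_pass(password):
--     return password[:1] + "*" * len(password[1:3]) + password[3:]
-- ===== Notes on version B (the rewrite author's own statement) =====
-- stated objective: simpler
-- what changed: Replaced the per-character loop with a manual index counter by one closed-form expression: the first character, then an asterisk run whose length is that of the slice at indices 1..2, then the tail from index 3.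
import Mathlib
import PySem

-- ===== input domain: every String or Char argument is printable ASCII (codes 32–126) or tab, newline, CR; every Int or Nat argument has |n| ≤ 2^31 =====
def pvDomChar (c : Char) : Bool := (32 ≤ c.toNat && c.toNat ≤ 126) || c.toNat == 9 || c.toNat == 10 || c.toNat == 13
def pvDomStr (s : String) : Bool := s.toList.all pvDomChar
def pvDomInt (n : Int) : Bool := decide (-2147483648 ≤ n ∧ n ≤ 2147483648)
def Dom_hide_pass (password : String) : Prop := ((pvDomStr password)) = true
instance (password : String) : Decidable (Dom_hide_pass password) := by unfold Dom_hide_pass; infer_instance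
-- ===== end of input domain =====

-- ===== PORT A =====
-- B replaces A's indexed per-character loop by one closed-form slice expression (simpler).
def hide_pass (password : String) : String :=
  let r := password.toList.foldl
    (fun (st : List Char × Int) i =>
      (st.1 ++ (if st.2 == 1 || st.2 == 2 then ['*'] else [i]), st.2 + 1))
    ([], 0)
  String.ofList r.1

-- ===== PORT B =====
def hide_pass_alt (password : String) : String :=
  let cs := password.toList
  String.ofList (PySem.List.slice cs none (some 1) ++
    List.replicate (PySem.List.slice cs (some 1) (some 3)).length '*' ++
    PySem.List.slice cs (some 3) none)

-- ===== PRECONDITION & SPEC =====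
def Spec_hide_pass (password : String) (out : String) : Prop := out = hide_pass_alt password
instance (password : String) (out : String) : Decidable (Spec_hide_pass password out) := by unfold Spec_hide_pass; infer_instance

-- ===== CLAIM (what is proved, stated in full; the proofs are below) =====
def Claim_equal_hide_pass : Prop := ∀ (password : String), Dom_hide_pass password → Spec_hide_pass password (hide_pass password)

-- ===== LEMMAS AND PROOFS =====
-- once index ≥ 3 the loop just appends the remaining characters unchanged
theorem hide_pass_loop_ge_three (l : List Char) (acc : List Char) (k : Int) (hk : 3 ≤ k) :
    l.foldl (fun (st : List Char × Int) i =>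
      (st.1 ++ (if st.2 == 1 || st.2 == 2 then ['*'] else [i]), st.2 + 1)) (acc, k)
    = (acc ++ l, k + l.length) := by
  induction l generalizing acc k with
  | nil => simp
  | cons a t ih =>
    have h1 : (k == 1) = false := by simp; omega
    have h2 : (k == 2) = false := by simp; omega
    simp only [List.foldl_cons, h1, h2, Bool.or_self, if_neg Bool.false_ne_true,
      ih (acc ++ [a]) (k + 1) (by omega)]
    simp
    omega

-- ===== VERDICT (by name: the statement is the Claim_ definition above) =====
theorem hide_pass_spec : Claim_equal_hide_pass := by
  intro password _
  unfold Spec_hide_pass hide_pass hide_pass_alt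
  match h : password.toList with
  | [] => simp [PySem.List.slice]
  | [a] => simp [PySem.List.slice]
  | [a, b] => norm_num [PySem.List.slice]
  | a :: b :: c :: rest =>
    simp only [List.foldl_cons]
    have hst : ((((([] : List Char) ++ if ((0:Int) == 1 || (0:Int) == 2) = true then ['*'] else [a]) ++
          if ((0:Int) + 1 == 1 || (0:Int) + 1 == 2) = true then ['*'] else [b]) ++
          if ((0:Int) + 1 + 1 == 1 || (0:Int) + 1 + 1 == 2) = true then ['*'] else [c]),
          ((0:Int) + 1 + 1 + 1)) = (([a, '*', '*'] : List Char), (3 : Int)) := by norm_num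
    rw [hst, hide_pass_loop_ge_three rest [a, '*', '*'] 3 (by omega)]
    have hm : min ((3:Int).toNat) (rest.length + 1 + 1 + 1) = 3 := by omega
    norm_num [PySem.List.slice, PySem.List.clampIdx, hm]
    have hl : rest.length + 1 + 1 + 1 - 3 = rest.length := by omega
    simp [hl, List.replicate]
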